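-- pv_equiv track=rewrite | github.com/va64doman/codility | Challenges/natrium2014.py | maxDistanceMonotonic
-- ===== SOURCE A (Python) =====
-- def maxDistanceMonotonic(A):
--     result = 0
--     N = len(A)
--     B = [0] * N
--     for i in range(N - 1, -1, -1):
--         B[i] = B[i + 1] if i + 1 < N and B[i + 1] > A[i] else A[i]
--     i = 0
--     j = 0
--     while j < N:
--         while j < N and B[j] >= A[i]:
--             j += 1
--         result = j - i - 1
--         j += 1
--         i += 1
--     return result
--     pass
-- ===== SOURCE B (Python) =====
-- def maxDistanceMonotonic(A):
--     result = 0
--     N = len(A)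
--     for i in range(N):
--         for j in range(N - 1, i - 1, -1):
--             if A[j] >= A[i]:
--                 result = max(result, j - i)
--                 break
--     return result
-- ===== Notes on version B (the rewrite author's own statement) =====
-- stated objective: alternative
-- what changed: Replaced the suffix-maximum array plus two-pointer sweep with a direct double loop: for each i scan j downward from N-1 and record j-i at the first j with A[j] >= A[i]; shorter and plainer, but quadratic.
import Mathlib
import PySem

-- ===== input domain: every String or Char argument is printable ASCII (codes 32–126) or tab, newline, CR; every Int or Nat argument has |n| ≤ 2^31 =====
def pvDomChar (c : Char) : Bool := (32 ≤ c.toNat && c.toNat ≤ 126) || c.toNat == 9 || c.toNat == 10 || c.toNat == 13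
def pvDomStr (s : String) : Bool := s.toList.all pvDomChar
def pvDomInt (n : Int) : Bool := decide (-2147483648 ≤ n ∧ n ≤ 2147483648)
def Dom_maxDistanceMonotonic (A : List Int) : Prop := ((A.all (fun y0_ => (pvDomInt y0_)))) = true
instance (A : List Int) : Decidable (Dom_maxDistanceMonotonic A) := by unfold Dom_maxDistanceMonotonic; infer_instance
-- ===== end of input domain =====

-- B replaces A's suffix-maximum array + two-pointer sweep by a plain double loop
-- (for each i, scan j downward from N-1 and take the first j with A[j] >= A[i]);
-- an alternative, shorter formulation — O(N^2) instead of A's O(N).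

-- ===== PORT A =====
-- A's backward loop filling B[i] = (B[i+1] if i+1 < N and B[i+1] > A[i] else A[i]),
-- written as the obvious right-to-left structural recursion over the same values.
def buildB : List Int → List Int
  | [] => []
  | a :: rest =>
    (match buildB rest with
     | [] => a
     | b :: _ => if a < b then b else a) :: buildB rest

-- inner `while j < N and B[j] >= A[i]: j += 1`  (list indices are always in range when read; getD 0 is never the default)
def innerA (Bv : List Int) (ai : Int) (N j : Nat) : Nat :=
  if h : j < N ∧ ai ≤ Bv.getD j 0 then innerA Bv ai N (j + 1) else j
  termination_by N - j
  decreasing_by omega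

-- needed by outerA's termination argument
theorem innerA_ge (Bv : List Int) (ai : Int) (N j : Nat) : j ≤ innerA Bv ai N j := by
  fun_induction innerA with
  | case1 _ _ ih => omega
  | case2 => omega

-- outer `while j < N` loop with state (i, j, result)
def outerA (Av Bv : List Int) (N i j : Nat) (result : Int) : Int :=
  if h : j < N then
    outerA Av Bv N (i + 1) (innerA Bv (Av.getD i 0) N j + 1)
      ((innerA Bv (Av.getD i 0) N j : Int) - (i : Int) - 1)
  else result
  termination_by N - j
  decreasing_by have := innerA_ge Bv (Av.getD i 0) N j; omega

def maxDistanceMonotonic (A : List Int) : Int :=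
  outerA A (buildB A) A.length 0 0 0

-- ===== PORT B =====
-- inner `for j in range(N-1, i-1, -1): if A[j] >= A[i]: … break` — first hit scanning downward
def findHit (Av : List Int) (ai : Int) (i j : Nat) : Option Nat :=
  if j < i then none
  else if ai ≤ Av.getD j 0 then some j
  else if h : j = 0 then none
  else findHit Av ai i (j - 1)
  termination_by j
  decreasing_by omega

def altStep (A : List Int) (result : Int) (i : Nat) : Int :=
  match findHit A (A.getD i 0) i (A.length - 1) with
  | some j => max result ((j : Int) - (i : Int))
  | none => result

def maxDistanceMonotonic_alt (A : List Int) : Int :=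
  (List.range A.length).foldl (altStep A) 0

-- ===== PRECONDITION & SPEC =====
def Spec_maxDistanceMonotonic (A : List Int) (out : Int) : Prop := out = maxDistanceMonotonic_alt A
instance (A : List Int) (out : Int) : Decidable (Spec_maxDistanceMonotonic A out) := by unfold Spec_maxDistanceMonotonic; infer_instance

-- ===== CLAIM (what is proved, stated in full; the proofs are below) =====
def Claim_equal_maxDistanceMonotonic : Prop := ∀ (A : List Int), Dom_maxDistanceMonotonic A → Spec_maxDistanceMonotonic A (maxDistanceMonotonic A)

-- ===== LEMMAS AND PROOFS =====

-- f A i = the greatest index k < |A| with A[k] ≥ A[i] (the value B's downward scan finds)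
def fIdx (A : List Int) (i : Nat) : Nat :=
  Nat.findGreatest (fun k => k < A.length ∧ A.getD i 0 ≤ A.getD k 0) (A.length - 1)

-- gmax A n = max(0, max_{i<n} (fIdx A i - i)) — the common canonical value
def gmax (A : List Int) : Nat → Int
  | 0 => 0
  | n + 1 => max (gmax A n) ((fIdx A n : Int) - (n : Int))

theorem buildB_length (A : List Int) : (buildB A).length = A.length := by
  induction A with
  | nil => rfl
  | cons a rest ih => simp [buildB, ih]

theorem buildB_ge (A : List Int) :
    ∀ j k, j ≤ k → k < A.length → A.getD k 0 ≤ (buildB A).getD j 0 := by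
  induction A with
  | nil => intro j k _ h; simp at h
  | cons a rest ih =>
    intro j k hjk hk
    cases j with
    | zero =>
      cases k with
      | zero =>
        simp only [buildB, List.getD_cons_zero]
        cases h : buildB rest with
        | nil => exact le_refl a
        | cons b t => split <;> omega
      | succ k =>
        have hrk : k < rest.length := by simp at hk; omega
        have hne := buildB_length rest
        cases h : buildB rest with
        | nil => rw [h] at hne; simp at hne; omega
        | cons b t =>
          have h1 : rest.getD k 0 ≤ b := by
            have := ih 0 k (Nat.zero_le _) hrk
            rw [h] at this; simpa using this
          have h2 : (a :: rest).getD (k + 1) 0 = rest.getD k 0 := by simp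
          have h3 : b ≤ (buildB (a :: rest)).getD 0 0 := by
            simp only [buildB, h, List.getD_cons_zero]
            split <;> omega
          rw [h2]; omega
    | succ j =>
      cases k with
      | zero => omega
      | succ k =>
        have h1 : (buildB (a :: rest)).getD (j + 1) 0 = (buildB rest).getD j 0 := by
          simp [buildB]
        have h2 : (a :: rest).getD (k + 1) 0 = rest.getD k 0 := by simp
        rw [h1, h2]
        exact ih j k (by omega) (by simp at hk; omega)

theorem buildB_attained (A : List Int) :
    ∀ j, j < A.length → ∃ k, j ≤ k ∧ k < A.length ∧ (buildB A).getD j 0 = A.getD k 0 := by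
  induction A with
  | nil => intro j h; simp at h
  | cons a rest ih =>
    intro j hj
    cases j with
    | zero =>
      cases h : buildB rest with
      | nil => exact ⟨0, le_refl _, hj, by simp [buildB, h]⟩
      | cons b t =>
        have hlen : 0 < rest.length := by
          have := buildB_length rest; rw [h] at this; simp at this; omega
        by_cases hab : a < b
        · obtain ⟨k', _, hk2, hk3⟩ := ih 0 hlen
          rw [h] at hk3
          simp only [List.getD_cons_zero] at hk3
          refine ⟨k' + 1, by omega, by simp; omega, ?_⟩
          have h2 : (a :: rest).getD (k' + 1) 0 = rest.getD k' 0 := by simp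
          rw [h2]
          simp only [buildB, h, List.getD_cons_zero]
          rw [if_pos hab]
          exact hk3
        · refine ⟨0, le_refl _, hj, ?_⟩
          simp only [buildB, h, List.getD_cons_zero]
          rw [if_neg hab]
    | succ j =>
      have hj' : j < rest.length := by simp at hj; omega
      obtain ⟨k, hk1, hk2, hk3⟩ := ih j hj'
      refine ⟨k + 1, by omega, by simp; omega, ?_⟩
      have h1 : (buildB (a :: rest)).getD (j + 1) 0 = (buildB rest).getD j 0 := by
        simp [buildB]
      have h2 : (a :: rest).getD (k + 1) 0 = rest.getD k 0 := by simp
      rw [h1, h2]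
      exact hk3

theorem fIdx_lt (A : List Int) (i : Nat) (hi : i < A.length) : fIdx A i < A.length := by
  have := Nat.findGreatest_le (P := fun k => k < A.length ∧ A.getD i 0 ≤ A.getD k 0) (A.length - 1)
  unfold fIdx; omega

theorem fIdx_spec (A : List Int) (i : Nat) (hi : i < A.length) :
    A.getD i 0 ≤ A.getD (fIdx A i) 0 := by
  have h := Nat.findGreatest_spec (P := fun k => k < A.length ∧ A.getD i 0 ≤ A.getD k 0)
    (n := A.length - 1) (m := i) (by omega) ⟨hi, le_refl _⟩
  unfold fIdx
  exact h.2

-- fIdx is below any j whose suffix maximum is < A[i]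
theorem fIdx_lt_of_B_lt (A : List Int) (i j : Nat) (hi : i < A.length) (hj : j < A.length)
    (hB : (buildB A).getD j 0 < A.getD i 0) : fIdx A i < j := by
  by_contra h
  push_neg at h
  have h1 := buildB_ge A j (fIdx A i) h (fIdx_lt A i hi)
  have h2 := fIdx_spec A i hi
  omega

-- fIdx is at least j if the suffix maximum at j is ≥ A[i]
theorem fIdx_ge_of_B_ge (A : List Int) (i j : Nat) (hj : j < A.length)
    (hB : A.getD i 0 ≤ (buildB A).getD j 0) : j ≤ fIdx A i := by
  obtain ⟨k, hk1, hk2, hk3⟩ := buildB_attained A j hj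
  have : k ≤ fIdx A i := by
    unfold fIdx
    exact Nat.le_findGreatest (by omega) ⟨hk2, by omega⟩
  omega

-- characterization of the inner while loop
theorem innerA_char (Bv : List Int) (ai : Int) (N j : Nat) :
    (¬ (innerA Bv ai N j < N ∧ ai ≤ Bv.getD (innerA Bv ai N j) 0)) ∧
    (∀ k, j ≤ k → k < innerA Bv ai N j → k < N ∧ ai ≤ Bv.getD k 0) := by
  fun_induction innerA with
  | case1 j h ih =>
    refine ⟨ih.1, ?_⟩
    intro k hk1 hk2
    rcases Nat.eq_or_lt_of_le hk1 with h' | h'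
    · exact h' ▸ h
    · exact ih.2 k h' hk2
  | case2 j h =>
    exact ⟨h, fun k hk1 hk2 => absurd (Nat.lt_of_le_of_lt hk1 hk2) (lt_irrefl j)⟩

-- the downward scan of B finds exactly fIdx
theorem findHit_eq (A : List Int) (i : Nat) :
    ∀ j, i ≤ j → j < A.length →
      findHit A (A.getD i 0) i j =
        some (Nat.findGreatest (fun k => k < A.length ∧ A.getD i 0 ≤ A.getD k 0) j) := by
  intro j
  induction j with
  | zero =>
    intro hij _
    have hi0 : i = 0 := by omega
    rw [findHit]
    simp [hi0, Nat.findGreatest_zero]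
  | succ j ihj =>
    intro hij hjN
    rw [findHit, Nat.findGreatest_succ]
    by_cases hc : A.getD i 0 ≤ A.getD (j + 1) 0
    · rw [if_neg (by omega), if_pos hc, if_pos ⟨hjN, hc⟩]
    · rcases Nat.eq_or_lt_of_le hij with h' | h'
      · exact absurd (h' ▸ le_refl (A.getD i 0)) hc
      · rw [if_neg (by omega), if_neg hc, dif_neg (by omega),
          if_neg (fun hP => hc hP.2)]
        simpa using ihj (by omega) (by omega)

-- gmax is unchanged past i once result dominates all later contributions
theorem gmax_later (A : List Int) (i : Nat) (result : Int) (h : result = gmax A i)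
    (hb : ∀ i', i ≤ i' → i' < A.length → ((fIdx A i' : Int) - (i' : Int)) ≤ result) :
    ∀ m, i ≤ m → m ≤ A.length → gmax A m = result := by
  intro m
  induction m with
  | zero =>
    intro h1 _
    have hi0 : i = 0 := by omega
    subst hi0
    exact h.symm
  | succ m ihm =>
    intro h1 h2
    rcases Nat.eq_or_lt_of_le h1 with h' | h'
    · exact h' ▸ h.symm
    · have him : i ≤ m := by omega
      have := ihm him (by omega)
      have hbm := hb m him (by omega)
      simp [gmax, this]
      omega

-- exit case of the outer loop
theorem outer_exit (A : List Int) (i j : Nat) (result : Int)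
    (hij : i ≤ j) (hiN : i ≤ A.length) (hjN : A.length ≤ j)
    (hr : result = max 0 ((j : Int) - (i : Int) - 1)) (hg : result = gmax A i) :
    result = gmax A A.length := by
  refine (gmax_later A i result hg ?_ A.length hiN (le_refl _)).symm
  intro i' h1 h2
  have hf := fIdx_lt A i' h2
  have : result = max 0 ((j : Int) - (i : Int) - 1) := hr
  omega

-- main invariant of the outer loop
theorem outer_inv (A : List Int) (K : Nat) :
    ∀ i j result, A.length - j ≤ K → i ≤ j → i ≤ A.length →
      result = max 0 ((j : Int) - (i : Int) - 1) → result = gmax A i →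
      outerA A (buildB A) A.length i j result = gmax A A.length := by
  induction K with
  | zero =>
    intro i j result hK hij hiN hr hg
    rw [outerA, dif_neg (by omega)]
    exact outer_exit A i j result hij hiN (by omega) hr hg
  | succ K ihK =>
    intro i j result hK hij hiN hr hg
    by_cases hjN : j < A.length
    · have hiNlt : i < A.length := by omega
      rw [outerA, dif_pos hjN]
      set ai := A.getD i 0 with hai
      set j' := innerA (buildB A) ai A.length j with hj'
      obtain ⟨hstop, hrun⟩ := innerA_char (buildB A) ai A.length j
      rw [← hj'] at hstop hrun
      have hjj' : j ≤ j' := innerA_ge (buildB A) ai A.length j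
      -- j' ≥ i + 1
      have hBi : ai ≤ (buildB A).getD i 0 := buildB_ge A i i (le_refl _) hiNlt
      have hj'gt : i + 1 ≤ j' := by
        rcases Nat.eq_or_lt_of_le hjj' with h' | h'
        · -- inner did not move: B[j] < ai, so j ≠ i
          rw [← h'] at hstop
          by_contra hcon
          have hji : j = i := by omega
          exact hstop ⟨hjN, hji ▸ hBi⟩
        · omega
      -- fIdx A i relations
      have hfid : (fIdx A i : Int) - (i : Int) ≤ (j' : Int) - (i : Int) - 1 ∧
          ((j < j') → fIdx A i = j' - 1) := by
        constructor
        · rcases Nat.eq_or_lt_of_le hjj' with h' | h'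
          · -- no move: B[j] < ai ⟹ fIdx < j = j'
            rw [← h'] at hstop
            have hBlt : (buildB A).getD j 0 < ai := by
              by_contra hc; push_neg at hc; exact hstop ⟨hjN, hc⟩
            have := fIdx_lt_of_B_lt A i j hiNlt hjN hBlt
            omega
          · -- moved: fIdx ≤ j' - 1
            by_cases hj'N : j' < A.length
            · have hBlt : (buildB A).getD j' 0 < ai := by
                by_contra hc; push_neg at hc; exact hstop ⟨hj'N, hc⟩
              have := fIdx_lt_of_B_lt A i j' hiNlt hj'N hBlt
              omega
            · have := fIdx_lt A i hiNlt
              omega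
        · intro hmove
          have h1 := hrun (j' - 1) (by omega) (by omega)
          have h2 := fIdx_ge_of_B_ge A i (j' - 1) h1.1 h1.2
          by_cases hj'N : j' < A.length
          · have hBlt : (buildB A).getD j' 0 < ai := by
              by_contra hc; push_neg at hc; exact hstop ⟨hj'N, hc⟩
            have := fIdx_lt_of_B_lt A i j' hiNlt hj'N hBlt
            omega
          · have := fIdx_lt A i hiNlt
            omega
      -- new result equals gmax A (i+1)
      have hnew : (j' : Int) - (i : Int) - 1 = gmax A (i + 1) := by
        have hgs : gmax A (i + 1) = max (gmax A i) ((fIdx A i : Int) - (i : Int)) := rfl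
        rcases Nat.eq_or_lt_of_le hjj' with h' | h'
        · -- no move: result unchanged
          have : result = (j : Int) - (i : Int) - 1 := by omega
          rw [hgs, ← hg]
          omega
        · -- moved: fIdx = j' - 1
          have hfe := hfid.2 h'
          rw [hgs, ← hg]
          have : result = max 0 ((j : Int) - (i : Int) - 1) := hr
          omega
      exact ihK (i + 1) (j' + 1) _ (by omega) (by omega) (by omega)
        (by omega) (by rw [hnew])
    · rw [outerA, dif_neg hjN]
      exact outer_exit A i j result hij hiN (by omega) hr hg
  
-- B's fold equals gmax
theorem alt_fold (A : List Int) :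
    ∀ n, n ≤ A.length → (List.range n).foldl (altStep A) 0 = gmax A n := by
  intro n
  induction n with
  | zero => intro _; rfl
  | succ n ihn =>
    intro h
    rw [List.range_succ, List.foldl_append, ihn (by omega)]
    have hN : A.length - 1 < A.length := by omega
    have := findHit_eq A n (A.length - 1) (by omega) hN
    simp only [List.foldl_cons, List.foldl_nil, altStep, this]
    rfl

-- ===== VERDICT (by name: the statement is the Claim_ definition above) =====
theorem maxDistanceMonotonic_spec : Claim_equal_maxDistanceMonotonic := by
  intro A _
  unfold Spec_maxDistanceMonotonic maxDistanceMonotonic maxDistanceMonotonic_alt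
  rw [alt_fold A A.length (le_refl _)]
  exact outer_inv A A.length 0 0 0 (by omega) (by omega) (by omega) (by decide) rfl
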